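-- pv_equiv track=rewrite | github.com/YarValeriy/DataScience_Project | app/src/services/summary_service.py | post_process_summary_kw
-- ===== SOURCE A (Python) =====
-- from typing import Tuple, List, Dict
--
-- def post_process_summary_kw(summary: str, keywords: List[str], original_text: str) -> str:
--     """
--     Ensures the generated summary includes the most important keywords.
--     """
--     missing_keywords = [keyword for keyword in keywords if keyword not in summary]
--
--     if missing_keywords:
--         # Add relevant sentences from the original text to cover missing keywords
--         for keyword in missing_keywords:
--             keyword_sentence = next((sentence for sentence in original_text.split('. ') if keyword in sentence), "")
--             if keyword_sentence:
--                 summary += f" {keyword_sentence}."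
--
--     return summary
-- ===== SOURCE B (Python) =====
-- def post_process_summary_kw(summary, keywords, original_text):
--     missing = [k for k in keywords if k not in summary]
--     if not missing:
--         return summary
--     # one pass over the sentences: record the first sentence containing each missing keyword
--     first_sent = {}
--     for sentence in original_text.split('. '):
--         for k in missing:
--             if k not in first_sent and k in sentence:
--                 first_sent[k] = sentence
--     parts = [summary]
--     for k in missing:
--         s = first_sent.get(k, "")
--         if s:
--             parts.append(f" {s}.")
--     return "".join(parts)
-- ===== Notes on version B (the rewrite author's own statement) =====
-- stated objective: faster
-- what changed: B splits the text once and does a single sentence-major pass that records the first sentence containing each missing keyword in a dict, then one keyword pass appends the looked-up sentences; A rescans the sentence list from scratch for every missing keyword.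
import Mathlib
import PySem

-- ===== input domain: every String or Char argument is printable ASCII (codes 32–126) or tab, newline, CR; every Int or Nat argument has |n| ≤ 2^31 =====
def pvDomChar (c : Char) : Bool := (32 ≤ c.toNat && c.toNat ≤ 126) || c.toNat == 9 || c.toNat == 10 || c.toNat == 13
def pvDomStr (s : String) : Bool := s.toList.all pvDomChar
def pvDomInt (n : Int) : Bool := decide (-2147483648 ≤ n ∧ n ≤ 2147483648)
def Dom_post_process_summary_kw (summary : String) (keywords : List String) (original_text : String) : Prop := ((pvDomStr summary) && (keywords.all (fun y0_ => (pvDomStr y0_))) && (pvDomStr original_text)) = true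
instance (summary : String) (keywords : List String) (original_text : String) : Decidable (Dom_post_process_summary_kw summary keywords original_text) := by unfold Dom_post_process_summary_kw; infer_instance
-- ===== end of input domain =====

-- B replaces A's per-keyword rescan of the sentence list by a single sentence-major pass
-- that records the first sentence containing each missing keyword in a dict (objective: faster, constant-factor).

-- ===== PORT A =====
def post_process_summary_kw (summary : String) (keywords : List String) (original_text : String) : String :=
  let missing_keywords := keywords.filter (fun keyword => !(PySem.Str.isIn keyword summary))
  if missing_keywords = [] then summary
  else
    missing_keywords.foldl (fun acc keyword =>
      let keyword_sentence :=
        (((PySem.Str.split? original_text ". ").getD []).find?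
          (fun sentence => PySem.Str.isIn keyword sentence)).getD ""
      if keyword_sentence ≠ "" then acc ++ " " ++ keyword_sentence ++ "." else acc) summary

-- ===== PORT B =====
def post_process_summary_kw_alt (summary : String) (keywords : List String) (original_text : String) : String :=
  let missing := keywords.filter (fun k => !(PySem.Str.isIn k summary))
  if missing = [] then summary
  else
    let first_sent := ((PySem.Str.split? original_text ". ").getD []).foldl (fun d sentence =>
        missing.foldl (fun d k =>
          if !(PySem.Dict.contains d k) && PySem.Str.isIn k sentence
          then PySem.Dict.insert d k sentence else d) d)
      PySem.Dict.empty
    let parts := missing.foldl (fun parts k =>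
        let s := PySem.Dict.getD first_sent k ""
        if s ≠ "" then parts ++ [" " ++ s ++ "."] else parts) [summary]
    PySem.Str.join "" parts

-- ===== PRECONDITION & SPEC =====
def Spec_post_process_summary_kw (summary : String) (keywords : List String) (original_text : String) (out : String) : Prop := out = post_process_summary_kw_alt summary keywords original_text
instance (summary : String) (keywords : List String) (original_text : String) (out : String) : Decidable (Spec_post_process_summary_kw summary keywords original_text out) := by unfold Spec_post_process_summary_kw; infer_instance

-- ===== CLAIM (what is proved, stated in full; the proofs are below) =====
def Claim_equal_post_process_summary_kw : Prop := ∀ (summary : String) (keywords : List String) (original_text : String), Dom_post_process_summary_kw summary keywords original_text → Spec_post_process_summary_kw summary keywords original_text (post_process_summary_kw summary keywords original_text)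

-- ===== LEMMAS AND PROOFS =====

theorem pv_intercalate_nil : ∀ (m : List (List Char)), List.intercalate ([] : List Char) m = m.flatten
  | [] => by simp [List.intercalate]
  | [a] => by simp [List.intercalate]
  | a :: b :: t => by
    have ih := pv_intercalate_nil (b :: t)
    simp only [List.intercalate] at ih ⊢
    rw [show List.intersperse ([] : List Char) (a :: b :: t) = a :: [] :: List.intersperse [] (b :: t) from by simp [List.intersperse]]
    simp only [List.flatten_cons] at ih ⊢
    simp [ih]

theorem pv_join_nil (l : List String) :
    PySem.Str.join "" l = String.ofList (l.map String.toList).flatten := by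
  simp [PySem.Str.join, PySem.Chars.join, pv_intercalate_nil, String.toList_empty]

theorem pv_join_nil_append (l : List String) (x : String) :
    PySem.Str.join "" (l ++ [x]) = PySem.Str.join "" l ++ x := by
  simp [pv_join_nil]

theorem pv_join_nil_singleton (x : String) : PySem.Str.join "" [x] = x := by
  simp [pv_join_nil]

-- the inner per-sentence fold: the dict gains `sentence` exactly at the missing keywords it lacked that occur in it
theorem pv_inner_get? (sentence : String) (missing : List String) (d : PySem.Dict String String) (k : String) :
    ((missing.foldl (fun d k =>
        if !(PySem.Dict.contains d k) && PySem.Str.isIn k sentence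
        then PySem.Dict.insert d k sentence else d) d).get? k)
      = if k ∈ missing ∧ d.contains k = false ∧ PySem.Str.isIn k sentence then some sentence else d.get? k := by
  induction missing generalizing d with
  | nil => simp
  | cons a t ih =>
    simp only [List.foldl_cons]
    rw [ih]
    by_cases hka : k = a
    · subst hka
      by_cases hc : d.contains k
      · simp [hc]
      · simp only [Bool.not_eq_true] at hc
        by_cases hin : PySem.Chars.isIn k.toList sentence.toList = true
        · simp [hc, hin]
        · simp [hc, hin]
    · have h1 : ∀ v, (d.insert a v).get? k = d.get? k := fun v => PySem.Dict.get?_insert_of_ne d v hka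
      have h2 : ∀ v, (d.insert a v).contains k = d.contains k := by
        intro v
        simp [PySem.Dict.contains_insert, hka]
      by_cases hca : d.contains a = true <;>
        by_cases hia : PySem.Chars.isIn a.toList sentence.toList = true <;>
        simp [hca, hia, h1, h2, List.mem_cons, hka]

-- the outer fold indexes each missing keyword by its first containing sentence
theorem pv_outer_get? (sents : List String) (missing : List String) (d : PySem.Dict String String) (k : String) (hk : k ∈ missing) :
    ((sents.foldl (fun d sentence =>
        missing.foldl (fun d k =>
          if !(PySem.Dict.contains d k) && PySem.Str.isIn k sentence
          then PySem.Dict.insert d k sentence else d) d) d).get? k)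
      = ((d.get? k).or (sents.find? (fun sentence => PySem.Str.isIn k sentence))) := by
  induction sents generalizing d with
  | nil => simp
  | cons s t ih =>
    simp only [List.foldl_cons]
    rw [ih, pv_inner_get?]
    rw [List.find?_cons]
    cases hg : d.get? k with
    | some v =>
      have hc : d.contains k = true := by rw [PySem.Dict.contains_eq_isSome_get?, hg]; rfl
      simp [hc]
    | none =>
      have hc : d.contains k = false := by rw [PySem.Dict.contains_eq_isSome_get?, hg]; rfl
      by_cases hin : PySem.Chars.isIn k.toList s.toList = true
      · simp [hc, hin, hk]
      · simp [hc, hin]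

-- the two keyword passes agree once the dict lookup is rewritten to find?
theorem pv_passes (sents : List String) (missing : List String) (parts : List String) :
    missing.foldl (fun acc keyword =>
      if ((sents.find? (fun sentence => PySem.Str.isIn keyword sentence)).getD "") ≠ ""
      then acc ++ " " ++ ((sents.find? (fun sentence => PySem.Str.isIn keyword sentence)).getD "") ++ "."
      else acc) (PySem.Str.join "" parts)
    = PySem.Str.join "" (missing.foldl (fun parts k =>
        if ((sents.find? (fun sentence => PySem.Str.isIn k sentence)).getD "") ≠ ""
        then parts ++ [" " ++ ((sents.find? (fun sentence => PySem.Str.isIn k sentence)).getD "") ++ "."]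
        else parts) parts) := by
  induction missing generalizing parts with
  | nil => rfl
  | cons k t ih =>
    simp only [List.foldl_cons]
    by_cases hs : ((sents.find? (fun sentence => PySem.Str.isIn k sentence)).getD "") = ""
    · rw [if_neg (not_not_intro hs), if_neg (not_not_intro hs)]
      exact ih parts
    · rw [if_pos hs, if_pos hs]
      have h2 := ih (parts ++ [" " ++ ((sents.find? (fun sentence => PySem.Str.isIn k sentence)).getD "") ++ "."])
      rw [pv_join_nil_append] at h2
      rw [← String.append_assoc, ← String.append_assoc] at h2
      exact h2

-- ===== VERDICT (by name: the statement is the Claim_ definition above) =====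
set_option maxHeartbeats 1000000 in
theorem post_process_summary_kw_spec : Claim_equal_post_process_summary_kw := by
  intro summary keywords original_text _
  unfold Spec_post_process_summary_kw post_process_summary_kw post_process_summary_kw_alt
  simp only []
  by_cases h : keywords.filter (fun k => !(PySem.Str.isIn k summary)) = []
  · rw [if_pos h, if_pos h]
  · rw [if_neg h, if_neg h]
    rw [PySem.List.foldl_congr_mem
      (keywords.filter (fun k => !(PySem.Str.isIn k summary)))
      _
      (fun parts k =>
        if (((PySem.Str.split? original_text ". ").getD []).find?
              (fun sentence => PySem.Str.isIn k sentence)).getD "" ≠ ""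
        then parts ++ [" " ++ (((PySem.Str.split? original_text ". ").getD []).find?
              (fun sentence => PySem.Str.isIn k sentence)).getD "" ++ "."]
        else parts)
      [summary]
      (by
        intro acc x hx
        simp only
        rw [PySem.Dict.getD_eq_get?_getD,
          pv_outer_get? ((PySem.Str.split? original_text ". ").getD [])
            (keywords.filter (fun k => !(PySem.Str.isIn k summary))) PySem.Dict.empty x hx,
          PySem.Dict.get?_empty, Option.none_or])]
    have hp := pv_passes ((PySem.Str.split? original_text ". ").getD [])
      (keywords.filter (fun k => !(PySem.Str.isIn k summary))) [summary]
    rw [pv_join_nil_singleton] at hp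
    exact hp
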